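-- pv_equiv track=rewrite | github.com/Mitso98/python-practice | lab2/t13.py | picker
-- ===== SOURCE A (Python) =====
-- def picker(numsList):
--     largest = 0
--     smallest = 0
--     for num in numsList:
--         if num > largest:
--             largest = num
--         if num < smallest:
--             smallest = num
--     return largest, smallest
-- ===== SOURCE B (Python) =====
-- def picker(numsList):
--     if not numsList:
--         return 0, 0
--     s = sorted(numsList)
--     return (s[-1] if s[-1] > 0 else 0, s[0] if s[0] < 0 else 0)
-- ===== Notes on version B (the rewrite author's own statement) =====
-- stated objective: alternative
-- what changed: Replaces A's fused single loop carrying (largest, smallest) with a sort-based method: sort the list once and clamp its last/first element at 0, trading O(n) scanning for O(n log n) sorting with no comparison loop of its own.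
import Mathlib
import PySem

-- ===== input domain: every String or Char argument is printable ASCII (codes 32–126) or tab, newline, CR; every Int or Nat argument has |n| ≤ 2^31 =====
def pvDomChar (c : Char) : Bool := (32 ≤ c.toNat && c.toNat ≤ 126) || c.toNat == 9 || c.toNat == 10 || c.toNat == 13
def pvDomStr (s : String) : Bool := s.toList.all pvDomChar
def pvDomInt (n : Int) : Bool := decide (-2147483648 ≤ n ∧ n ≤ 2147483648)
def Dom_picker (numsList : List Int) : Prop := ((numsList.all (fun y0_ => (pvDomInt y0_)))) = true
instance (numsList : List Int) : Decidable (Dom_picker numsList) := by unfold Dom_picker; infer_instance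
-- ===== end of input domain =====

-- B replaces A's fused single comparison loop with a sort: sort the list once and
-- clamp its last/first element at 0; objective: alternative (sort-based, no scan loop of its own).

-- ===== PORT A =====
-- one fused loop over the list, carrying (largest, smallest)
def picker (numsList : List Int) : Int × Int :=
  numsList.foldl
    (fun (s : Int × Int) num =>
      (if num > s.1 then num else s.1, if num < s.2 then num else s.2))
    (0, 0)

-- ===== PORT B =====
-- sort once; s[-1]/s[0] are the extremes, clamped at 0 (getD 0 only totalises the
-- never-none access on a nonempty sorted list)
def picker_alt (numsList : List Int) : Int × Int :=
  if numsList = [] then (0, 0)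
  else
    let s := PySem.List.sorted numsList (fun x => x) false
    let hi := (PySem.List.pyGet? s (-1)).getD 0
    let lo := (PySem.List.pyGet? s 0).getD 0
    (if hi > 0 then hi else 0, if lo < 0 then lo else 0)

-- ===== PRECONDITION & SPEC =====
def Spec_picker (numsList : List Int) (out : Int × Int) : Prop := out = picker_alt numsList
instance (numsList : List Int) (out : Int × Int) : Decidable (Spec_picker numsList out) := by unfold Spec_picker; infer_instance

-- ===== CLAIM =====
def Claim_equal_picker : Prop := ∀ (numsList : List Int), Dom_picker numsList → Spec_picker numsList (picker numsList)

-- ===== LEMMAS AND PROOFS =====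
lemma picker_fold_pair (l : List Int) (a b : Int) :
    l.foldl
      (fun (s : Int × Int) num =>
        (if num > s.1 then num else s.1, if num < s.2 then num else s.2))
      (a, b) = (l.foldl max a, l.foldl min b) := by
  induction l generalizing a b with
  | nil => simp
  | cons x xs ih =>
      simp only [List.foldl_cons, ih]
      congr 1 <;> [skip; skip] <;> congr 1 <;> omega

-- a member that bounds the list from above is the running max (up to the accumulator)
lemma foldl_max_of_mem (l : List Int) (a m : Int) (hm : m ∈ l) (hub : ∀ y ∈ l, y ≤ m) :
    l.foldl max a = max a m := by
  have h1 := PySem.List.le_foldl_max l a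
  have h2 := PySem.List.foldl_max_mem l a
  refine le_antisymm ?_ (max_le h1.1 (h1.2 _ hm))
  rcases h2 with h | h
  · rw [h]; exact le_max_left a m
  · exact le_trans (hub _ h) (le_max_right a m)

lemma foldl_min_of_mem (l : List Int) (a m : Int) (hm : m ∈ l) (hlb : ∀ y ∈ l, m ≤ y) :
    l.foldl min a = min a m := by
  have h1 := PySem.List.foldl_min_le l a
  have h2 := PySem.List.foldl_min_mem l a
  refine le_antisymm (le_min h1.1 (h1.2 _ hm)) ?_
  rcases h2 with h | h
  · rw [h]; exact min_le_left a m
  · exact le_trans (min_le_right a m) (hlb _ h)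

-- in a ≤-pairwise list every member is at most the last element
lemma mem_le_getLast (l : List Int) (hne : l ≠ []) (hpw : l.Pairwise (· ≤ ·)) :
    ∀ y ∈ l, y ≤ l.getLast hne := by
  induction l with
  | nil => simp at hne
  | cons x xs ih =>
      intro y hy
      rcases List.pairwise_cons.mp hpw with ⟨hx, hxs⟩
      by_cases hxe : xs = []
      · subst hxe; simp at hy; simp [hy]
      · rw [List.getLast_cons hxe]
        rcases List.mem_cons.mp hy with rfl | hy'
        · exact le_trans (hx _ (List.getLast_mem hxe)) (le_refl _)
        · exact ih hxe hxs y hy'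

-- ===== VERDICT =====
theorem picker_spec : Claim_equal_picker := by
  intro l _
  show picker l = picker_alt l
  by_cases hnil : l = []
  · subst hnil; simp [picker, picker_alt]
  · have hs : PySem.List.sorted l (fun x => x) false ≠ [] := by
      simpa [PySem.List.sorted_eq_nil_iff] using hnil
    obtain ⟨h, t, hst⟩ := List.exists_cons_of_ne_nil hs
    have hperm : (PySem.List.sorted l (fun x => x) false).Perm l :=
      PySem.List.sorted_perm _ _ _
    have hpw : (h :: t).Pairwise (fun a b => a ≤ b) := by
      rw [← hst]; simpa using PySem.List.sorted_pairwise l (fun x => x)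
    have hhead_lb : ∀ y ∈ l, h ≤ y := by
      intro y hy
      simpa using PySem.List.key_head_sorted_le (xs := l) (key := fun x => x) hst y hy
    have hhead_mem : h ∈ l := hperm.mem_iff.mp (by simp [hst])
    have hlast_ne : (h :: t) ≠ [] := by simp
    set L := (h :: t).getLast hlast_ne with hL
    have hlast_mem : L ∈ l := hperm.mem_iff.mp (by rw [hst]; exact List.getLast_mem _)
    have hlast_ub : ∀ y ∈ l, y ≤ L := by
      intro y hy
      have hy' : y ∈ (h :: t) := by rw [← hst]; exact hperm.mem_iff.mpr hy
      exact mem_le_getLast _ hlast_ne hpw y hy'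
    rw [picker, picker_fold_pair, picker_alt, if_neg hnil]
    simp only [hst, PySem.List.pyGet?_neg_one, PySem.List.pyGet?_zero_cons,
      List.getLast?_eq_some_getLast hlast_ne, Option.getD_some]
    rw [foldl_max_of_mem l 0 L hlast_mem hlast_ub,
        foldl_min_of_mem l 0 h hhead_mem hhead_lb]
    simp only [Prod.mk.injEq]
    constructor <;> split_ifs <;> omega
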